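-- pv_equiv track=rewrite | github.com/HwiNyeonKim/algorithm-2025 | programmers/monthly_code_challenge/스타_수열.py | solution
-- ===== SOURCE A (Python) =====
-- from collections import defaultdict
--
-- def solution(a):
--     if len(a) < 2:
--         return 0
--
--     counter = defaultdict(int)
--
--     for number in a:
--         counter[number] += 1
--
--     answer = 0
--     for key, count in counter.items():
--         if 2 * count <= answer:
--             # 계산 해 봤자, 의미가 없다. 이미 계산된 것들 중에 더 좋은 답이 있다.
--             continue
--
--         used = [False] * len(a)
--         start_sequence_length = 0
--
--         for i in range(len(a) - 1):
--             if not used[i] and not used[i + 1]: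
--                 if a[i] != a[i + 1] and (a[i] == key or a[i + 1] == key):
--                     start_sequence_length += 2
--                     used[i] = True
--                     used[i + 1] = True
--
--         answer = max(answer, start_sequence_length)
--
--     return answer
-- ===== SOURCE B (Python) =====
-- def solution(a):
--     # one pass over adjacent pairs: per-key pair count and last-used index
--     cnt = {}
--     last = {}
--     for i in range(len(a) - 1):
--         x, y = a[i], a[i + 1]
--         if x != y:
--             if last.get(x, -1) != i:
--                 cnt[x] = cnt.get(x, 0) + 2
--                 last[x] = i + 1
--             if last.get(y, -1) != i:
--                 cnt[y] = cnt.get(y, 0) + 2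
--                 last[y] = i + 1
--     return max(cnt.values(), default=0)
-- ===== Notes on version B (the rewrite author's own statement) =====
-- stated objective: alternative
-- what changed: A re-scans the whole array once per distinct value with a per-key array of used flags; B makes a single pass over adjacent pairs maintaining per-key pair counts and last-used indices in two dicts, then takes the max of the counts.
import Mathlib
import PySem

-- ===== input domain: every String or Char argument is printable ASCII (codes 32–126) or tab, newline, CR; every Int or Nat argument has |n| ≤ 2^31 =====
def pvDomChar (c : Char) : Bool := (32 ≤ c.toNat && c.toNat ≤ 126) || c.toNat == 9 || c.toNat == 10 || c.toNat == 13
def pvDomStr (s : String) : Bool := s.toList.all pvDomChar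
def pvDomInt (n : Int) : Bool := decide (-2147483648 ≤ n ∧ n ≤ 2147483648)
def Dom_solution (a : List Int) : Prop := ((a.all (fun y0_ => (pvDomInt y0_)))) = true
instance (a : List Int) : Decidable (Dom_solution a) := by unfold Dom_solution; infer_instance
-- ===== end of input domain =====

-- B replaces A's per-key rescans of the whole array (used-flag marking) with one pass over
-- adjacent pairs maintaining per-key pair counts and last-used indices.

-- ===== PORT A =====
-- one step of A's inner per-key loop: greedy left-to-right pairing with a used-flag array
def stepA (a : List Int) (key : Int) (s : List Bool × Int) (i : Int) : List Bool × Int :=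
  if PySem.List.pyGetD s.1 i false = false ∧ PySem.List.pyGetD s.1 (i+1) false = false then
    if PySem.List.pyGetD a i 0 ≠ PySem.List.pyGetD a (i+1) 0 ∧
       (PySem.List.pyGetD a i 0 = key ∨ PySem.List.pyGetD a (i+1) 0 = key) then
      -- used[i] = used[i+1] = True  (i ≥ 0 here, so .toNat is exact)
      ((s.1.set i.toNat true).set (i+1).toNat true, s.2 + 2)
    else s
  else s

def innerLoopA (a : List Int) (key : Int) : List Bool × Int :=
  (PySem.List.pyRange 0 ((a.length : Int) - 1) 1).foldl (stepA a key)
    (List.replicate a.length false, 0)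

def solution (a : List Int) : Int :=
  if a.length < 2 then 0
  else
    (a.foldl (fun c number => c.modify number 0 (· + 1)) (PySem.Dict.empty : PySem.Dict Int Int)).items.foldl
      (fun answer kv =>
        if 2 * kv.2 ≤ answer then answer
        else max answer (innerLoopA a kv.1).2) 0

-- ===== PORT B =====
-- one step of B's single pass: at pair (i, i+1) update count/last for the two keys involved
def stepB (a : List Int) (s : PySem.Dict Int Int × PySem.Dict Int Int) (i : Int) :
    PySem.Dict Int Int × PySem.Dict Int Int :=
  let x := PySem.List.pyGetD a i 0
  let y := PySem.List.pyGetD a (i+1) 0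
  if x ≠ y then
    let s1 := if s.2.getD x (-1) ≠ i then (s.1.insert x (s.1.getD x 0 + 2), s.2.insert x (i+1)) else s
    if s1.2.getD y (-1) ≠ i then (s1.1.insert y (s1.1.getD y 0 + 2), s1.2.insert y (i+1)) else s1
  else s

def solution_alt (a : List Int) : Int :=
  let s := (PySem.List.pyRange 0 ((a.length : Int) - 1) 1).foldl (stepB a)
    (PySem.Dict.empty, PySem.Dict.empty)
  PySem.List.maxD s.1.values (fun v => v) 0

-- ===== PRECONDITION & SPEC =====
def Spec_solution (a : List Int) (out : Int) : Prop := out = solution_alt a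
instance (a : List Int) (out : Int) : Decidable (Spec_solution a out) := by unfold Spec_solution; infer_instance

-- ===== CLAIM (what is proved, stated in full; the proofs are below) =====
def Claim_equal_solution : Prop := ∀ (a : List Int), Dom_solution a → Spec_solution a (solution a)

-- ===== LEMMAS AND PROOFS =====

-- reference per-key recurrence: state (2·pairs so far, index just after the last taken pair, -1 if none)
def pvStep (a : List Int) (k : Int) (s : Int × Int) (i : Int) : Int × Int :=
  if PySem.List.pyGetD a i 0 ≠ PySem.List.pyGetD a (i+1) 0 ∧
     (PySem.List.pyGetD a i 0 = k ∨ PySem.List.pyGetD a (i+1) 0 = k) ∧ s.2 ≠ i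
  then (s.1 + 2, i + 1) else s

def pvP (a : List Int) (k : Int) (m : Int) : Int × Int :=
  (PySem.List.pyRange 0 m 1).foldl (pvStep a k) (0, -1)

def pvG (a : List Int) (k : Int) : Int × Int := pvP a k ((a.length : Int) - 1)

-- generic indexed-invariant lemma for a fold over range(lo, hi)
theorem pvFoldInv {σ : Type} (R : Int → σ → Prop) (f : σ → Int → σ) (hi : Int)
    (hstep : ∀ i s, 0 ≤ i → i < hi → R i s → R (i+1) (f s i)) :
    ∀ (d : Nat) (lo : Int) (s : σ), 0 ≤ lo → hi - lo = (d : Int) → R lo s →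
      R hi ((PySem.List.pyRange lo hi 1).foldl f s) := by
  intro d
  induction d with
  | zero =>
    intro lo s _ hd hR
    have : hi = lo := by omega
    subst this
    rw [PySem.List.pyRange_one_eq_nil (le_refl _)]
    exact hR
  | succ d ih =>
    intro lo s hlo hd hR
    have hlt : lo < hi := by omega
    rw [PySem.List.pyRange_one_cons hlt, List.foldl_cons]
    exact ih (lo + 1) (f s lo) (by omega) (by omega) (hstep lo s hlo hlt hR)

-- two-fold version: an indexed relation between two folds over the same range
theorem pvFoldInv2 {σ τ : Type} (R : Int → σ → τ → Prop) (f : σ → Int → σ) (g : τ → Int → τ)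
    (hi : Int)
    (hstep : ∀ i s t, 0 ≤ i → i < hi → R i s t → R (i+1) (f s i) (g t i)) :
    ∀ (d : Nat) (lo : Int) (s : σ) (t : τ), 0 ≤ lo → hi - lo = (d : Int) → R lo s t →
      R hi ((PySem.List.pyRange lo hi 1).foldl f s) ((PySem.List.pyRange lo hi 1).foldl g t) := by
  intro d
  induction d with
  | zero =>
    intro lo s t _ hd hR
    have : hi = lo := by omega
    subst this
    rw [PySem.List.pyRange_one_eq_nil (le_refl _)]
    exact hR
  | succ d ih =>
    intro lo s t hlo hd hR
    have hlt : lo < hi := by omega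
    rw [PySem.List.pyRange_one_cons hlt, List.foldl_cons, List.foldl_cons]
    exact ih (lo + 1) (f s lo) (g t lo) (by omega) (by omega) (hstep lo s t hlo hlt hR)

theorem pvP_succ (a : List Int) (k : Int) (m : Int) (hm : 0 ≤ m) :
    pvP a k (m + 1) = pvStep a k (pvP a k m) m := by
  unfold pvP
  rw [PySem.List.pyRange_one_succ_right hm, List.foldl_append, List.foldl_cons, List.foldl_nil]

theorem pvStep_fst_mono (a : List Int) (k : Int) (l : List Int) :
    ∀ s : Int × Int, s.1 ≤ (l.foldl (pvStep a k) s).1 := by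
  induction l with
  | nil => intro s; exact le_refl _
  | cons i t ih =>
    intro s
    refine le_trans ?_ (ih (pvStep a k s i))
    unfold pvStep
    split
    · simp
    · exact le_refl _

theorem pvP_fst_nonneg (a : List Int) (k : Int) (m : Int) : 0 ≤ (pvP a k m).1 :=
  pvStep_fst_mono a k _ (0, -1)

-- ===== A-side: the used[] greedy equals the last-index recurrence =====
def pvRelA (a : List Int) (m : Int) (u : List Bool × Int) (g : Int × Int) : Prop :=
  u.1.length = a.length ∧ u.2 = g.1 ∧ -1 ≤ g.2 ∧ g.2 ≤ m ∧
  (∀ j : Nat, g.2 < (j : Int) → u.1.getD j false = false) ∧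
  (0 ≤ g.2 → u.1.getD g.2.toNat false = true)

theorem pvGetD_set_ne (l : List Bool) (i j : Nat) (b d : Bool) (h : i ≠ j) :
    (l.set i b).getD j d = l.getD j d := by
  simp [List.getD_eq_getElem?_getD, List.getElem?_set_ne h]

theorem innerLoopA_eq_pvG (a : List Int) (k : Int) (h2 : 2 ≤ a.length) :
    (innerLoopA a k).2 = (pvG a k).1 := by
  have main := pvFoldInv2 (pvRelA a) (stepA a k) (pvStep a k) ((a.length : Int) - 1)
    ?_ (a.length - 1) 0 (List.replicate a.length false, 0) (0, -1) (le_refl 0) (by omega) ?_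
  · exact main.2.1
  · -- the step preserves the relation
    intro i s t h0i hilt hR
    obtain ⟨hlen, hcnt, hg1, hg2, hfalse, htrue⟩ := hR
    have hu1 : PySem.List.pyGetD s.1 (i+1) false = false := by
      rw [PySem.List.pyGetD_of_nonneg _ _ (by omega)]
      exact hfalse _ (by omega)
    by_cases hti : t.2 = i
    · -- used[i] is true; neither side moves
      have hu0 : PySem.List.pyGetD s.1 i false = true := by
        rw [PySem.List.pyGetD_of_nonneg _ _ h0i]
        have := htrue (by omega)
        rwa [hti] at this
      unfold stepA pvStep
      rw [if_neg (by simp [hu0]), if_neg (by simp [hti])]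
      exact ⟨hlen, hcnt, hg1, by omega, hfalse, htrue⟩
    · have hu0 : PySem.List.pyGetD s.1 i false = false := by
        rw [PySem.List.pyGetD_of_nonneg _ _ h0i]
        exact hfalse _ (by omega)
      unfold stepA pvStep
      rw [if_pos ⟨hu0, hu1⟩]
      by_cases hc : PySem.List.pyGetD a i 0 ≠ PySem.List.pyGetD a (i+1) 0 ∧
          (PySem.List.pyGetD a i 0 = k ∨ PySem.List.pyGetD a (i+1) 0 = k)
      · rw [if_pos hc, if_pos ⟨hc.1, hc.2, hti⟩]
        refine ⟨by simp [hlen], by simp [hcnt], by omega, le_refl _, ?_, ?_⟩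
        · intro j hj
          rw [pvGetD_set_ne _ _ _ _ _ (by omega), pvGetD_set_ne _ _ _ _ _ (by omega)]
          exact hfalse j (by omega)
        · intro _
          have hlt : (i+1).toNat < ((s.1.set i.toNat true)).length := by
            rw [List.length_set, hlen]; omega
          simp only []
          rw [List.getD_eq_getElem?_getD]
          rw [List.getElem?_set_self (by omega)]
          simp
      · rw [if_neg hc, if_neg (by tauto)]
        exact ⟨hlen, hcnt, hg1, by omega, hfalse, htrue⟩
  · -- the initial states are related
    refine ⟨by simp, rfl, by omega, by omega, ?_, by omega⟩
    intro j _
    simp [List.getD_eq_getElem?_getD, List.getElem?_replicate]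
    split <;> rfl

-- ===== prune bound: the greedy never exceeds twice the key's multiplicity =====
theorem pvCountStep (a : List Int) (k : Int) (t q p : Nat) (htp : t ≤ p) (hpq : p < q)
    (hp : p < a.length) (hk : a[p] = k) :
    (a.take t).count k + 1 ≤ (a.take q).count k := by
  have h1 : a.take q = a.take t ++ (a.take q).drop t := by
    have h := List.take_append_drop t (a.take q)
    rw [List.take_take, min_eq_left (by omega)] at h
    exact h.symm
  rw [h1, List.count_append]
  have hlt : p - t < ((a.take q).drop t).length := by
    simp [List.length_drop, List.length_take]; omega
  have hmem : k ∈ (a.take q).drop t := by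
    have hval : ((a.take q).drop t)[p - t]'hlt = k := by
      rw [List.getElem_drop, List.getElem_take]
      have : t + (p - t) = p := by omega
      simp only [this]
      exact hk
    exact hval ▸ List.getElem_mem hlt
  have := List.count_pos_iff.mpr hmem
  omega

theorem pvG_le_two_count (a : List Int) (k : Int) :
    (pvG a k).1 ≤ 2 * (a.count k : Int) := by
  rcases Nat.eq_zero_or_pos a.length with h0 | h1
  · have : ((a.length : Int) - 1) ≤ 0 := by omega
    unfold pvG pvP
    rw [PySem.List.pyRange_one_eq_nil this]
    simp
  · have main := pvFoldInv
      (fun m s => -1 ≤ s.2 ∧ s.2 ≤ m ∧ s.1 ≤ 2 * (((a.take (s.2+1).toNat).count k : Nat) : Int))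
      (pvStep a k) ((a.length : Int) - 1) ?_ (a.length - 1) 0 (0, -1) (le_refl 0) (by omega)
      (by refine ⟨by omega, by omega, by simp⟩)
    · obtain ⟨_, _, hb⟩ := main
      unfold pvG pvP
      have hsub : ∀ (t : Nat), (a.take t).count k ≤ a.count k :=
        fun t => (List.take_sublist _ _).count_le k
      have := hsub ((List.foldl (pvStep a k) (0, -1)
        (PySem.List.pyRange 0 ((a.length : Int) - 1) 1)).2 + 1).toNat
      omega
    · intro i s h0i hilt hR
      obtain ⟨h1, h2, h3⟩ := hR
      unfold pvStep
      by_cases hc : PySem.List.pyGetD a i 0 ≠ PySem.List.pyGetD a (i+1) 0 ∧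
          (PySem.List.pyGetD a i 0 = k ∨ PySem.List.pyGetD a (i+1) 0 = k) ∧ s.2 ≠ i
      · rw [if_pos hc]
        refine ⟨by omega, le_refl _, ?_⟩
        have hcount : (a.take (s.2+1).toNat).count k + 1 ≤ (a.take (i+1+1).toNat).count k := by
          rcases hc.2.1 with hx | hy
          · refine pvCountStep a k _ _ i.toNat (by omega) (by omega) (by omega) ?_
            rw [PySem.List.pyGetD_of_nonneg _ _ h0i] at hx
            rw [← List.getD_eq_getElem a 0 (by omega)]
            exact hx
          · refine pvCountStep a k _ _ (i+1).toNat (by omega) (by omega) (by omega) ?_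
            rw [PySem.List.pyGetD_of_nonneg _ _ (by omega : (0:Int) ≤ i+1)] at hy
            rw [← List.getD_eq_getElem a 0 (by omega)]
            exact hy
        simp only []
        omega
      · rw [if_neg hc]
        exact ⟨h1, by omega, h3⟩

-- ===== B-side invariant =====
def pvInvB (a : List Int) (m : Int) (s : PySem.Dict Int Int × PySem.Dict Int Int) : Prop :=
  (∀ k, s.1.getD k 0 = (pvP a k m).1 ∧ s.2.getD k (-1) = (pvP a k m).2) ∧
  s.1.keys.Nodup ∧ (∀ k ∈ s.1.keys, k ∈ a) ∧ (∀ v ∈ s.1.values, 0 ≤ v)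

-- one conditional per-key update of B's step, factored out for the invariant proof
def pvU (i z : Int) (s : PySem.Dict Int Int × PySem.Dict Int Int) :
    PySem.Dict Int Int × PySem.Dict Int Int :=
  if s.2.getD z (-1) ≠ i then (s.1.insert z (s.1.getD z 0 + 2), s.2.insert z (i+1)) else s

theorem pvU_getD_ne (i z k : Int) (s : PySem.Dict Int Int × PySem.Dict Int Int) (hk : k ≠ z) :
    (pvU i z s).1.getD k 0 = s.1.getD k 0 ∧ (pvU i z s).2.getD k (-1) = s.2.getD k (-1) := by
  unfold pvU; split <;> simp [PySem.Dict.getD_insert, hk]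

theorem pvU_getD_self (i z : Int) (s : PySem.Dict Int Int × PySem.Dict Int Int) :
    ((pvU i z s).1.getD z 0, (pvU i z s).2.getD z (-1)) =
      if s.2.getD z (-1) ≠ i then (s.1.getD z 0 + 2, i+1)
      else (s.1.getD z 0, s.2.getD z (-1)) := by
  unfold pvU; split <;> simp

theorem pvU_nodup (i z : Int) (s : PySem.Dict Int Int × PySem.Dict Int Int)
    (h : s.1.keys.Nodup) : (pvU i z s).1.keys.Nodup := by
  unfold pvU; split
  · exact PySem.Dict.nodup_keys_insert _ _ _ h
  · exact h

theorem pvU_mem_keys (i z k : Int) (s : PySem.Dict Int Int × PySem.Dict Int Int)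
    (h : k ∈ (pvU i z s).1.keys) : k = z ∨ k ∈ s.1.keys := by
  unfold pvU at h; split at h
  · exact (PySem.Dict.mem_keys_insert _ _ _ _).mp h
  · exact Or.inr h

theorem pvU_mem_values (i z : Int) (v : Int) (s : PySem.Dict Int Int × PySem.Dict Int Int)
    (h : v ∈ (pvU i z s).1.values) : v = s.1.getD z 0 + 2 ∨ v ∈ s.1.values := by
  unfold pvU at h; split at h
  · exact PySem.Dict.mem_values_insert _ _ _ _ h
  · exact Or.inr h

theorem pvInvB_final (a : List Int) (h2 : 2 ≤ a.length) :
    pvInvB a ((a.length : Int) - 1)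
      ((PySem.List.pyRange 0 ((a.length : Int) - 1) 1).foldl (stepB a)
        (PySem.Dict.empty, PySem.Dict.empty)) := by
  have main := pvFoldInv (pvInvB a) (stepB a) ((a.length : Int) - 1)
    ?_ (a.length - 1) 0 (PySem.Dict.empty, PySem.Dict.empty) (le_refl 0) (by omega) ?_
  · exact main
  · intro i s h0i hilt hInv
    obtain ⟨hkv, hnd, hka, hvn⟩ := hInv
    have hPs : ∀ k, pvP a k (i+1) = pvStep a k (pvP a k i) i := fun k => pvP_succ a k i h0i
    have hmem : ∀ (j : Int), 0 ≤ j → j < (a.length : Int) → PySem.List.pyGetD a j 0 ∈ a := by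
      intro j hj hjl
      rw [PySem.List.pyGetD_of_nonneg _ _ hj, List.getD_eq_getElem a 0 (by omega)]
      exact List.getElem_mem _
    by_cases hxy : PySem.List.pyGetD a i 0 = PySem.List.pyGetD a (i+1) 0
    · have hs : stepB a s i = s := by
        simp only [stepB]; rw [if_neg (by simp [hxy])]
      rw [hs]
      refine ⟨fun k => ?_, hnd, hka, hvn⟩
      have hid : pvStep a k (pvP a k i) i = pvP a k i := by
        unfold pvStep; rw [if_neg (by simp [hxy])]
      rw [hPs k, hid]
      exact hkv k
    · -- x ≠ y : the step is two conditional one-key updates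
      have hs : stepB a s i =
          pvU i (PySem.List.pyGetD a (i+1) 0) (pvU i (PySem.List.pyGetD a i 0) s) := by
        simp only [stepB, pvU]; rw [if_pos hxy]
      rw [hs]
      set X := PySem.List.pyGetD a i 0 with hXdef
      set Y := PySem.List.pyGetD a (i+1) 0 with hYdef
      refine ⟨fun k => ?_, ?_, ?_, ?_⟩
      · -- per-key counts and last indices advance by one pvStep
        rw [hPs k]
        by_cases hkX : k = X
        · rw [hkX]
          have h1 := pvU_getD_ne i Y X (pvU i X s) hxy
          have h2 := pvU_getD_self i X s
          have hcond : pvStep a X (pvP a X i) i =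
              if (pvP a X i).2 ≠ i then ((pvP a X i).1 + 2, i + 1) else pvP a X i := by
            unfold pvStep
            rw [← hXdef, ← hYdef]
            by_cases hc : (pvP a X i).2 = i
            · rw [if_neg (by simp [hc]), if_neg (by simp [hc])]
            · rw [if_pos ⟨hxy, Or.inl rfl, hc⟩, if_pos hc]
          rw [h1.1, h1.2, hcond]
          rw [(hkv X).1, (hkv X).2] at h2
          by_cases hc : (pvP a X i).2 = i
          · rw [if_neg (by simp [hc])] at h2 ⊢
            exact ⟨congrArg Prod.fst h2, congrArg Prod.snd h2⟩
          · rw [if_pos hc] at h2 ⊢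
            exact ⟨congrArg Prod.fst h2, congrArg Prod.snd h2⟩
        · by_cases hkY : k = Y
          · rw [hkY]
            have h2 := pvU_getD_self i Y (pvU i X s)
            have h1 := pvU_getD_ne i X Y s (fun h => hxy h.symm)
            have hcond : pvStep a Y (pvP a Y i) i =
                if (pvP a Y i).2 ≠ i then ((pvP a Y i).1 + 2, i + 1) else pvP a Y i := by
              unfold pvStep
              rw [← hXdef, ← hYdef]
              by_cases hc : (pvP a Y i).2 = i
              · rw [if_neg (by simp [hc]), if_neg (by simp [hc])]
              · rw [if_pos ⟨hxy, Or.inr rfl, hc⟩, if_pos hc]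
            rw [hcond]
            rw [h1.1, h1.2, (hkv Y).1, (hkv Y).2] at h2
            by_cases hc : (pvP a Y i).2 = i
            · rw [if_neg (by simp [hc])] at h2 ⊢
              exact ⟨congrArg Prod.fst h2, congrArg Prod.snd h2⟩
            · rw [if_pos hc] at h2 ⊢
              exact ⟨congrArg Prod.fst h2, congrArg Prod.snd h2⟩
          · have h1 := pvU_getD_ne i Y k (pvU i X s) hkY
            have h2 := pvU_getD_ne i X k s hkX
            have hid : pvStep a k (pvP a k i) i = pvP a k i := by
              unfold pvStep
              rw [← hXdef, ← hYdef, if_neg (by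
                intro h
                rcases h.2.1 with h' | h'
                · exact hkX h'.symm
                · exact hkY h'.symm)]
            rw [h1.1, h1.2, h2.1, h2.2, hid]
            exact hkv k
      · exact pvU_nodup _ _ _ (pvU_nodup _ _ _ hnd)
      · intro k hk
        rcases pvU_mem_keys _ _ _ _ hk with h | h
        · exact h ▸ hmem (i+1) (by omega) (by omega)
        · rcases pvU_mem_keys _ _ _ _ h with h' | h'
          · exact h' ▸ hmem i h0i (by omega)
          · exact hka k h'
      · intro v hv
        rcases pvU_mem_values _ _ _ _ hv with h | h
        · have hY : (pvU i X s).1.getD Y 0 = s.1.getD Y 0 :=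
            (pvU_getD_ne i X Y s (fun h' => hxy h'.symm)).1
          rw [hY, (hkv Y).1] at h
          have := pvP_fst_nonneg a Y i
          omega
        · rcases pvU_mem_values _ _ _ _ h with h' | h'
          · rw [(hkv X).1] at h'
            have := pvP_fst_nonneg a X i
            omega
          · exact hvn v h'
  · -- initial invariant at index 0
    refine ⟨fun k => ?_, by simp, by simp,
      by intro v hv; simp [PySem.Dict.values, PySem.Dict.empty] at hv⟩
    have : pvP a k 0 = (0, -1) := by
      unfold pvP
      rw [PySem.List.pyRange_one_eq_nil (le_refl 0)]
      rfl
    rw [this]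
    simp

-- ===== max bookkeeping =====
theorem pvMaxEq (F : Int → Int) (K1 K2 : List Int) (h21 : ∀ k ∈ K2, k ∈ K1)
    (h0 : ∀ k ∈ K1, k ∉ K2 → F k = 0) :
    (K1.map F).foldl max 0 = (K2.map F).foldl max 0 := by
  have hle : ∀ (L M : List Int), (∀ v ∈ L, v ≤ M.foldl max 0) → L.foldl max 0 ≤ M.foldl max 0 := by
    intro L M hv
    rcases PySem.List.foldl_max_mem L 0 with h | h
    · rw [h]; exact (PySem.List.le_foldl_max M 0).1
    · exact hv _ h
  apply le_antisymm
  · apply hle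
    intro v hv
    rcases List.mem_map.mp hv with ⟨x, hx, rfl⟩
    by_cases hx2 : x ∈ K2
    · exact (PySem.List.le_foldl_max (K2.map F) 0).2 _ (List.mem_map.mpr ⟨x, hx2, rfl⟩)
    · rw [h0 x hx hx2]; exact (PySem.List.le_foldl_max (K2.map F) 0).1
  · apply hle
    intro v hv
    rcases List.mem_map.mp hv with ⟨x, hx, rfl⟩
    exact (PySem.List.le_foldl_max (K1.map F) 0).2 _ (List.mem_map.mpr ⟨x, h21 x hx, rfl⟩)

theorem pvPrune (G C : Int → Int) (hGC : ∀ k, G k ≤ 2 * C k) :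
    ∀ (K : List Int) (ans : Int),
      K.foldl (fun ans k => if 2 * C k ≤ ans then ans else max ans (G k)) ans =
      K.foldl (fun ans k => max ans (G k)) ans := by
  intro K
  induction K with
  | nil => intro ans; rfl
  | cons k t ih =>
    intro ans
    simp only [List.foldl_cons]
    by_cases h : 2 * C k ≤ ans
    · rw [if_pos h, max_eq_left (le_trans (hGC k) h)]
      exact ih ans
    · rw [if_neg h]
      exact ih (max ans (G k))

theorem pvMaxD_eq_foldl (vs : List Int) (hnn : ∀ v ∈ vs, 0 ≤ v) :
    PySem.List.maxD vs (fun v => v) 0 = vs.foldl max 0 := by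
  cases vs with
  | nil => simp [pysem]
  | cons v t =>
    have h0 : max 0 v = v := max_eq_right (hnn v (List.mem_cons_self))
    simp only [List.foldl_cons, h0]
    simp [pysem]

theorem solution_eq_alt (a : List Int) : solution a = solution_alt a := by
  by_cases hlen : a.length < 2
  · unfold solution solution_alt
    rw [if_pos hlen]
    rw [PySem.List.pyRange_one_eq_nil (by omega : ((a.length : Int) - 1) ≤ 0)]
    rfl
  · have h2 : 2 ≤ a.length := by omega
    unfold solution
    rw [if_neg hlen]
    rw [← PySem.Dict.counter_eq_foldl, PySem.Dict.items_counter, List.foldl_map]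
    simp only []
    have hG : (fun (x : Int) (y : Int) =>
          if 2 * ((List.count y a : Nat) : Int) ≤ x then x else max x (innerLoopA a y).2)
        = (fun x y => if 2 * ((List.count y a : Nat) : Int) ≤ x then x
            else max x ((pvG a y).1)) := by
      funext x y; rw [innerLoopA_eq_pvG a y h2]
    rw [hG, pvPrune (fun k => (pvG a k).1) (fun k => ((List.count k a : Nat) : Int))
      (fun k => pvG_le_two_count a k) (PySem.Set.ofList a) 0]
    -- B side
    obtain ⟨hkv, hnd, hka, hvn⟩ := pvInvB_final a h2
    unfold solution_alt
    set s := (PySem.List.pyRange 0 ((a.length : Int) - 1) 1).foldl (stepB a)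
      (PySem.Dict.empty, PySem.Dict.empty) with hsdef
    simp only []
    rw [pvMaxD_eq_foldl _ hvn, PySem.Dict.values_eq_map_keys s.1 hnd 0]
    have hmapeq : s.1.keys.map (fun k => s.1.getD k 0) = s.1.keys.map (fun k => (pvG a k).1) :=
      List.map_congr_left (fun k _ => (hkv k).1)
    rw [hmapeq]
    have hA : (PySem.Set.ofList a).foldl (fun x y => max x ((pvG a y).1)) 0
        = ((PySem.Set.ofList a).map (fun k => (pvG a k).1)).foldl max 0 :=
      List.foldl_map.symm
    rw [hA]
    exact pvMaxEq (fun k => (pvG a k).1) (PySem.Set.ofList a) s.1.keys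
      (fun k hk => (PySem.Set.mem_ofList a k).mpr (hka k hk))
      (fun k _ hnk => by
        have hc : s.1.contains k = false := by
          cases h : s.1.contains k
          · rfl
          · exact absurd ((PySem.Dict.contains_iff_mem_keys s.1 k).mp h) hnk
        show (pvG a k).1 = 0
        rw [show (pvG a k).1 = (pvP a k ((a.length : Int) - 1)).1 from rfl,
          ← (hkv k).1, PySem.Dict.getD_of_not_contains _ _ hc])

-- ===== VERDICT (by name: the statement is the Claim_ definition above) =====
theorem solution_spec : Claim_equal_solution := by
  intro a _
  unfold Spec_solution
  exact solution_eq_alt a
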